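-- pv_equiv track=rewrite | github.com/JuliaDescamps/JDL | jdl.py | separtiret
-- ===== SOURCE A (Python) =====
-- def tiret_debut(v):
--     res = []
--     for i in range(len(v)) :
--         for j in range(i + 1, len(v)):
--             if i == 0 and v[j] == "-":
--                 res.append(v[i:j+1])
--     return(res)
--
-- def tiret_milieu(v):
--     res = []
--     for i in range(len(v)) :
--         for j in range(i + 1, len(v)):
--             if v[i] == "-" and v[j] == "-":
--                 res.append(v[i:j+1])
--                 res.append(v[i:j+1])
--     return(res)
--
-- def tiret_fin(v):
--     res = []
--     for i in range(len(v)) :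
--         for j in range(i + 1, len(v)):
--             if v[i] == "-" and j == len(v) - 1:
--                 res.append(v[i:j+1])
--     return(res)
--
-- def separtiret(liste):
--     bouts_tirets_debut = []
--     bouts_tirets_milieu = []
--     bouts_tirets_fin = []
--     for v in liste:
--         bouts_tirets_debut = bouts_tirets_debut + tiret_debut(v)
--         bouts_tirets_milieu = bouts_tirets_milieu + tiret_milieu(v)
--         bouts_tirets_fin = bouts_tirets_fin + tiret_fin(v)
--     return(bouts_tirets_debut, bouts_tirets_milieu, bouts_tirets_fin)
-- ===== SOURCE B (Python) =====
-- def separtiret(liste):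
--     debut, milieu, fin = [], [], []
--     for v in liste:
--         n = len(v)
--         pos = [k for k, c in enumerate(v) if c == "-"]
--         debut.extend(v[:j + 1] for j in pos if j >= 1)
--         for idx, i in enumerate(pos):
--             for j in pos[idx + 1:]:
--                 seg = v[i:j + 1]
--                 milieu.append(seg)
--                 milieu.append(seg)
--         fin.extend(v[i:] for i in pos if i < n - 1)
--     return (debut, milieu, fin)
-- ===== Notes on version B (the rewrite author's own statement) =====
-- stated objective: faster
-- what changed: Instead of scanning all O(n^2) index pairs of every string three times, B collects each string's dash positions in one linear pass and builds the three result lists directly from that position list (prefixes, dash-pair segments, suffixes).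
import Mathlib
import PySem

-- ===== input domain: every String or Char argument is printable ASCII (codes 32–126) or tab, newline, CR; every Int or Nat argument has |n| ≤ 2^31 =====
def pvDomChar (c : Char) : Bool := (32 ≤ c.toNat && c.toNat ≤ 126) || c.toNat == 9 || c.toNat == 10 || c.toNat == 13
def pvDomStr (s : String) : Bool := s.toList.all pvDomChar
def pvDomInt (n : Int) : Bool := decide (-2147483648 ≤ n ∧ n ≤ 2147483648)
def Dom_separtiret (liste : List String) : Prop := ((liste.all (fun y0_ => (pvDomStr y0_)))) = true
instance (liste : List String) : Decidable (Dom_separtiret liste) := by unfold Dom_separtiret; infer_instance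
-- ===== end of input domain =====

-- B replaces A's three quadratic all-pairs scans per string by one linear pass collecting dash positions,
-- from which the three result lists are built directly (objective: faster).
-- ===== PORT A =====
def tiretDebut (v : String) : List String :=
  let cs := v.toList
  let n : Int := cs.length
  (PySem.List.pyRange 0 n 1).foldl (fun res i =>
    (PySem.List.pyRange (i+1) n 1).foldl (fun res j =>
      if i = 0 ∧ PySem.List.pyGetD cs j ' ' = '-' then
        res ++ [String.ofList (PySem.List.slice cs (some i) (some (j+1)))]
      else res) res) []

def tiretMilieu (v : String) : List String :=
  let cs := v.toList
  let n : Int := cs.length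
  (PySem.List.pyRange 0 n 1).foldl (fun res i =>
    (PySem.List.pyRange (i+1) n 1).foldl (fun res j =>
      if PySem.List.pyGetD cs i ' ' = '-' ∧ PySem.List.pyGetD cs j ' ' = '-' then
        res ++ [String.ofList (PySem.List.slice cs (some i) (some (j+1)))]
            ++ [String.ofList (PySem.List.slice cs (some i) (some (j+1)))]
      else res) res) []

def tiretFin (v : String) : List String :=
  let cs := v.toList
  let n : Int := cs.length
  (PySem.List.pyRange 0 n 1).foldl (fun res i =>
    (PySem.List.pyRange (i+1) n 1).foldl (fun res j =>
      if PySem.List.pyGetD cs i ' ' = '-' ∧ j = n - 1 then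
        res ++ [String.ofList (PySem.List.slice cs (some i) (some (j+1)))]
      else res) res) []

def separtiret (liste : List String) : List String × List String × List String :=
  liste.foldl (fun st v =>
    (st.1 ++ tiretDebut v, st.2.1 ++ tiretMilieu v, st.2.2 ++ tiretFin v))
    ([], [], [])

-- ===== PORT B =====
def dashPositions : List Char → Nat → List Nat
  | [], _ => []
  | c :: t, k => if c = '-' then k :: dashPositions t (k+1) else dashPositions t (k+1)

def debutB (cs : List Char) (pos : List Nat) : List String :=
  (pos.filter (fun j => 1 ≤ j)).map (fun j => String.ofList (cs.take (j+1)))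

def milieuB (cs : List Char) : List Nat → List String
  | [] => []
  | i :: rest => rest.flatMap (fun j =>
      [String.ofList ((cs.drop i).take (j - i + 1)), String.ofList ((cs.drop i).take (j - i + 1))]) ++ milieuB cs rest

def finB (cs : List Char) (pos : List Nat) : List String :=
  (pos.filter (fun i => i + 1 < cs.length)).map (fun i => String.ofList (cs.drop i))

def separtiret_alt (liste : List String) : List String × List String × List String :=
  liste.foldl (fun st v =>
    let cs := v.toList
    let pos := dashPositions cs 0
    (st.1 ++ debutB cs pos, st.2.1 ++ milieuB cs pos, st.2.2 ++ finB cs pos))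
    ([], [], [])

-- ===== PRECONDITION & SPEC =====
def Spec_separtiret (liste : List String) (out : List String × List String × List String) : Prop := out = separtiret_alt liste
instance (liste : List String) (out : List String × List String × List String) : Decidable (Spec_separtiret liste out) := by unfold Spec_separtiret; infer_instance

-- ===== CLAIM (what is proved, stated in full; the proofs are below) =====
def Claim_equal_separtiret : Prop := ∀ (liste : List String), Dom_separtiret liste → Spec_separtiret liste (separtiret liste)

-- ===== LEMMAS AND PROOFS =====
theorem flatMap_guard {α β : Type} (P : α → Prop) [DecidablePred P] (g : α → List β) (xs : List α) :
    xs.flatMap (fun x => if P x then g x else []) = (xs.filter (fun x => decide (P x))).flatMap g := by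
  induction xs with
  | nil => rfl
  | cons x t ih => by_cases h : P x <;> simp [h, ih]

theorem flatMap_point {α β : Type} [DecidableEq α] (xs : List α) (h : xs.Nodup) (c : α) (L : α → List β) :
    xs.flatMap (fun x => if x = c then L x else []) = if c ∈ xs then L c else [] := by
  induction xs with
  | nil => simp
  | cons x t ih =>
    rcases List.nodup_cons.mp h with ⟨hx, ht⟩
    by_cases hxc : x = c
    · subst hxc
      simp [hx, ih ht]
    · have hcx : ¬ c = x := fun h' => hxc h'.symm
      simp [hxc, ih ht, hcx]

theorem flatMap_single {α β : Type} (f : α → β) (l : List α) :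
    l.flatMap (fun x => [f x]) = l.map f := by
  induction l with
  | nil => rfl
  | cons x t ih => simp [ih]

theorem pyRange_cast_filter (a n : Nat) :
    PySem.List.pyRange (a : Int) (n : Int) 1 =
      ((List.range n).filter (fun b => decide (a ≤ b))).map Int.ofNat := by
  induction n with
  | zero => simp [PySem.List.pyRange_one_eq_nil]
  | succ n ih =>
    by_cases h : a ≤ n
    · have e : ((n+1 : Nat) : Int) = (n : Int) + 1 := by push_cast; ring
      rw [e, PySem.List.pyRange_one_succ_right (by exact_mod_cast h), ih, List.range_succ]
      simp [h]
    · rw [PySem.List.pyRange_one_eq_nil (by push_cast; omega),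
          List.filter_eq_nil_iff.mpr (by intro b hb; simp at hb ⊢; omega)]
      rfl

theorem Ashape (n : Nat) (P : Int → Int → Prop) [inst : ∀ i j, Decidable (P i j)] (L : Int → Int → List String) :
    (PySem.List.pyRange 0 (n : Int) 1).foldl (fun res i =>
      (PySem.List.pyRange (i+1) (n : Int) 1).foldl (fun res j =>
        if P i j then res ++ L i j else res) res) ([] : List String)
    = (List.range n).flatMap (fun (a : Nat) =>
        ((List.range n).filter (fun (b : Nat) => decide (a+1 ≤ b))).flatMap (fun (b : Nat) =>
          if P (a : Int) (b : Int) then L (a : Int) (b : Int) else [])) := by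
  have inner : ∀ (i : Int) (res : List String),
      (PySem.List.pyRange (i+1) (n : Int) 1).foldl (fun res j =>
        if P i j then res ++ L i j else res) res
      = res ++ (PySem.List.pyRange (i+1) (n : Int) 1).flatMap (fun j => if P i j then L i j else []) := by
    intro i res
    have : (fun (res : List String) j => if P i j then res ++ L i j else res)
         = (fun res j => res ++ (if P i j then L i j else [])) := by
      funext res j; split <;> simp
    rw [this, PySem.List.foldl_append_eq_flatMap]
  have outer : (fun (res : List String) i =>
      (PySem.List.pyRange (i+1) (n : Int) 1).foldl (fun res j =>
        if P i j then res ++ L i j else res) res)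
      = (fun res i => res ++ (PySem.List.pyRange (i+1) (n : Int) 1).flatMap (fun j => if P i j then L i j else [])) := by
    funext res i; exact inner i res
  rw [outer, PySem.List.foldl_append_eq_flatMap]
  rw [show (0 : Int) = ((0 : Nat) : Int) from rfl, pyRange_cast_filter 0 n]
  rw [List.filter_eq_self.mpr (by intro b _; simp)]
  rw [List.flatMap_map]
  simp only [List.nil_append]
  apply List.flatMap_congr
  intro a _
  rw [show (Int.ofNat a + 1 : Int) = ((a+1 : Nat) : Int) from by push_cast [Int.ofNat_eq_natCast]; ring,
      pyRange_cast_filter (a+1) n, List.flatMap_map]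
  rfl

theorem dashPositions_eq : ∀ (cs : List Char) (k : Nat),
    dashPositions cs k =
      ((List.range cs.length).filter (fun j => decide (cs.getD j ' ' = '-'))).map (fun j => j + k) := by
  intro cs
  induction cs with
  | nil => intro k; rfl
  | cons c t ih =>
    intro k
    simp only [List.length_cons, List.range_succ_eq_map, List.filter_cons, List.filter_map,
      dashPositions]
    by_cases h : c = '-' <;>
      simp [h, ih (k+1), Function.comp_def, Nat.add_comm, Nat.add_left_comm] <;> rfl

theorem dashPositions_zero (cs : List Char) :
    dashPositions cs 0 = (List.range cs.length).filter (fun j => decide (cs.getD j ' ' = '-')) := by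
  rw [dashPositions_eq]
  simp

theorem debut_eq (v : String) :
    tiretDebut v = debutB v.toList (dashPositions v.toList 0) := by
  unfold tiretDebut
  set cs := v.toList with hcs
  rw [Ashape cs.length (fun i j => i = 0 ∧ PySem.List.pyGetD cs j ' ' = '-')
        (fun i j => [String.ofList (PySem.List.slice cs (some i) (some (j+1)))])]
  -- pull the i = 0 conjunct out
  have step1 : ∀ a : Nat,
      (((List.range cs.length).filter (fun b => decide (a+1 ≤ b))).flatMap (fun (b : Nat) =>
        if (a : Int) = 0 ∧ PySem.List.pyGetD cs (b : Int) ' ' = '-' then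
          [String.ofList (PySem.List.slice cs (some (a : Int)) (some ((b : Int)+1)))] else []))
      = if a = 0 then
          (((List.range cs.length).filter (fun b => decide (a+1 ≤ b))).flatMap (fun (b : Nat) =>
            if PySem.List.pyGetD cs (b : Int) ' ' = '-' then
              [String.ofList (PySem.List.slice cs (some (a : Int)) (some ((b : Int)+1)))] else []))
        else [] := by
    intro a
    by_cases ha : a = 0
    · subst ha; simp
    · have : ((a : Nat) : Int) ≠ 0 := by exact_mod_cast ha
      simp [ha]
  rw [List.flatMap_congr (fun a _ => step1 a)]
  rw [flatMap_point _ (List.nodup_range) 0]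
  by_cases hn : 0 ∈ List.range cs.length
  · rw [if_pos hn]
    rw [flatMap_guard (fun b : Nat => PySem.List.pyGetD cs (b:Int) ' ' = '-')]
    have hpred : ((List.range cs.length).filter (fun b => decide (0+1 ≤ b))).filter
          (fun b : Nat => decide (PySem.List.pyGetD cs (b:Int) ' ' = '-'))
        = (dashPositions cs 0).filter (fun j => decide (1 ≤ j)) := by
      rw [dashPositions_zero, List.filter_comm]
      rw [List.filter_congr (fun (b : Nat) _ => by simp : ∀ b ∈ List.range cs.length,
            (decide (PySem.List.pyGetD cs (b:Int) ' ' = '-')) = (decide (cs.getD b ' ' = '-')))]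
    rw [hpred]
    unfold debutB
    rw [flatMap_single]
    apply List.map_congr_left
    intro j _
    congr 1
    rw [show ((0:Nat):Int) = 0 from rfl, PySem.List.slice_zero_start,
        show ((j:Nat):Int) + 1 = ((j+1 : Nat):Int) from by push_cast; ring,
        PySem.List.slice_to_natCast]
  · rw [if_neg hn]
    simp at hn
    unfold debutB
    rw [dashPositions_zero, hn]
    simp

theorem pairs_eq (cs : List Char) : ∀ P : List Nat, P.Pairwise (· < ·) →
    P.flatMap (fun i => (P.filter (fun j => decide (i+1 ≤ j))).flatMap (fun j =>
      [String.ofList ((cs.drop i).take (j + 1 - i)), String.ofList ((cs.drop i).take (j + 1 - i))]))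
    = milieuB cs P := by
  intro P
  induction P with
  | nil => intro _; rfl
  | cons i rest ih =>
    intro hp
    rcases List.pairwise_cons.mp hp with ⟨hlt, hrest⟩
    rw [List.flatMap_cons]
    have hfilt : (i :: rest).filter (fun j => decide (i+1 ≤ j)) = rest := by
      rw [List.filter_cons, if_neg (by simp)]
      exact List.filter_eq_self.mpr (fun j hj => by simpa using (hlt j hj))
    rw [hfilt]
    have hhead : rest.flatMap (fun j =>
        [String.ofList ((cs.drop i).take (j + 1 - i)), String.ofList ((cs.drop i).take (j + 1 - i))])
        = rest.flatMap (fun j =>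
        [String.ofList ((cs.drop i).take (j - i + 1)), String.ofList ((cs.drop i).take (j - i + 1))]) := by
      apply List.flatMap_congr
      intro j hj
      have : i < j := hlt j hj
      have : j + 1 - i = j - i + 1 := by omega
      rw [this]
    have htail : rest.flatMap (fun i' => ((i :: rest).filter (fun j => decide (i'+1 ≤ j))).flatMap (fun j =>
        [String.ofList ((cs.drop i').take (j + 1 - i')), String.ofList ((cs.drop i').take (j + 1 - i'))]))
        = milieuB cs rest := by
      rw [List.flatMap_congr (fun i' hi' => by
        rw [List.filter_cons, if_neg (by have := hlt i' hi'; simp; omega)])]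
      exact ih hrest
    rw [hhead, htail, milieuB]

theorem dashPositions_pairwise (cs : List Char) : (dashPositions cs 0).Pairwise (· < ·) := by
  rw [dashPositions_zero]
  exact (List.pairwise_lt_range).filter _

theorem milieu_eq (v : String) :
    tiretMilieu v = milieuB v.toList (dashPositions v.toList 0) := by
  unfold tiretMilieu
  set cs := v.toList with hcs
  simp only [List.append_assoc]
  rw [Ashape cs.length
        (fun i j => PySem.List.pyGetD cs i ' ' = '-' ∧ PySem.List.pyGetD cs j ' ' = '-')
        (fun i j => [String.ofList (PySem.List.slice cs (some i) (some (j+1)))]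
                 ++ [String.ofList (PySem.List.slice cs (some i) (some (j+1)))])]
  have step1 : ∀ a ∈ List.range cs.length,
      (((List.range cs.length).filter (fun b => decide (a+1 ≤ b))).flatMap (fun (b : Nat) =>
        if PySem.List.pyGetD cs (a : Int) ' ' = '-' ∧ PySem.List.pyGetD cs (b : Int) ' ' = '-' then
          [String.ofList (PySem.List.slice cs (some (a : Int)) (some ((b : Int)+1)))]
          ++ [String.ofList (PySem.List.slice cs (some (a : Int)) (some ((b : Int)+1)))] else []))
      = if cs.getD a ' ' = '-' then
          (((List.range cs.length).filter (fun b => decide (a+1 ≤ b))).flatMap (fun (b : Nat) =>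
            if PySem.List.pyGetD cs (b : Int) ' ' = '-' then
              [String.ofList (PySem.List.slice cs (some (a : Int)) (some ((b : Int)+1)))]
              ++ [String.ofList (PySem.List.slice cs (some (a : Int)) (some ((b : Int)+1)))] else []))
        else [] := by
    intro a _
    by_cases ha : cs.getD a ' ' = '-' <;>
      [skip; skip] <;>
      · simp only [List.getD_eq_getElem?_getD] at ha
        simp [ha, PySem.List.pyGetD_natCast]
  rw [List.flatMap_congr step1]
  rw [flatMap_guard (fun a : Nat => cs.getD a ' ' = '-')]
  rw [← dashPositions_zero]
  have Kred : ∀ a ∈ dashPositions cs 0,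
      (((List.range cs.length).filter (fun b => decide (a+1 ≤ b))).flatMap (fun (b : Nat) =>
        if PySem.List.pyGetD cs (b : Int) ' ' = '-' then
          [String.ofList (PySem.List.slice cs (some (a : Int)) (some ((b : Int)+1)))]
          ++ [String.ofList (PySem.List.slice cs (some (a : Int)) (some ((b : Int)+1)))] else []))
      = ((dashPositions cs 0).filter (fun j => decide (a+1 ≤ j))).flatMap (fun j =>
          [String.ofList ((cs.drop a).take (j + 1 - a)), String.ofList ((cs.drop a).take (j + 1 - a))]) := by
    intro a _
    rw [flatMap_guard (fun b : Nat => PySem.List.pyGetD cs (b:Int) ' ' = '-')]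
    rw [List.filter_comm]
    rw [List.filter_congr (fun (b : Nat) _ => by simp : ∀ b ∈ List.range cs.length,
          (decide (PySem.List.pyGetD cs (b:Int) ' ' = '-')) = (decide (cs.getD b ' ' = '-')))]
    rw [← dashPositions_zero]
    apply List.flatMap_congr
    intro j _
    rw [show ((j:Nat):Int) + 1 = ((j+1 : Nat):Int) from by push_cast; ring,
        PySem.List.slice_natCast]
    rfl
  rw [List.flatMap_congr Kred]
  exact pairs_eq cs _ (dashPositions_pairwise cs)

theorem fin_eq (v : String) :
    tiretFin v = finB v.toList (dashPositions v.toList 0) := by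
  unfold tiretFin
  set cs := v.toList with hcs
  rw [Ashape cs.length
        (fun i j => PySem.List.pyGetD cs i ' ' = '-' ∧ j = (cs.length : Int) - 1)
        (fun i j => [String.ofList (PySem.List.slice cs (some i) (some (j+1)))])]
  rcases Nat.eq_zero_or_pos cs.length with hn | hn
  · rw [List.length_eq_zero_iff.mp hn] at *
    simp [hn, finB, dashPositions]
  · have step1 : ∀ a ∈ List.range cs.length,
        (((List.range cs.length).filter (fun b => decide (a+1 ≤ b))).flatMap (fun (b : Nat) =>
          if PySem.List.pyGetD cs (a : Int) ' ' = '-' ∧ (b : Int) = (cs.length : Int) - 1 then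
            [String.ofList (PySem.List.slice cs (some (a : Int)) (some ((b : Int)+1)))] else []))
        = if cs.getD a ' ' = '-' ∧ a + 1 ≤ cs.length - 1 then [String.ofList (cs.drop a)] else [] := by
      intro a ha
      have hconv : ∀ b : Nat, ((b : Int) = (cs.length : Int) - 1) ↔ (b = cs.length - 1) := by
        intro b; omega
      by_cases hda : cs.getD a ' ' = '-'
      · have hda' : PySem.List.pyGetD cs (a : Int) ' ' = '-' := by
          simpa [PySem.List.pyGetD_natCast] using hda
        simp only [hda', true_and]
        simp only [hconv]
        rw [flatMap_point _ ((List.nodup_range).filter _) (cs.length - 1)]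
        by_cases hm : a + 1 ≤ cs.length - 1
        · rw [if_pos (by simp [List.mem_filter, List.mem_range]; omega), if_pos ⟨hda, hm⟩]
          congr 1
          rw [show ((cs.length - 1 : Nat) : Int) + 1 = ((cs.length : Nat) : Int) from by omega,
              show ((a : Nat) : Int) = ((a : Nat) : Int) from rfl]
          rw [PySem.List.slice_natCast]
          rw [List.take_of_length_le (by simp)]
        · rw [if_neg (by simp [List.mem_filter, List.mem_range]; omega),
              if_neg (by tauto)]
      · have hda' : ¬ PySem.List.pyGetD cs (a : Int) ' ' = '-' := by
          simpa [PySem.List.pyGetD_natCast] using hda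
        rw [if_neg (by tauto)]
        apply List.flatMap_eq_nil_iff.mpr
        intro b _
        rw [if_neg (by tauto)]
    rw [List.flatMap_congr step1]
    have : (fun (a : Nat) => if cs.getD a ' ' = '-' ∧ a + 1 ≤ cs.length - 1
              then [String.ofList (cs.drop a)] else [])
         = (fun a => if (fun (a : Nat) => cs.getD a ' ' = '-' ∧ a + 1 ≤ cs.length - 1) a
              then [String.ofList (cs.drop a)] else []) := rfl
    rw [this, flatMap_guard (fun (a : Nat) => cs.getD a ' ' = '-' ∧ a + 1 ≤ cs.length - 1)]
    rw [List.filter_congr (fun (a : Nat) _ => by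
          simp [Bool.and_comm] :
        ∀ a ∈ List.range cs.length,
          (decide (cs.getD a ' ' = '-' ∧ a + 1 ≤ cs.length - 1))
          = ((decide (a + 1 ≤ cs.length - 1)) && (decide (cs.getD a ' ' = '-'))))]
    rw [← List.filter_filter, ← dashPositions_zero]
    rw [flatMap_single]
    unfold finB
    congr 1
    apply List.filter_congr
    intro a _
    simp
    omega

theorem fold_bodies_eq :
    (fun (st : List String × List String × List String) (v : String) =>
      (st.1 ++ tiretDebut v, st.2.1 ++ tiretMilieu v, st.2.2 ++ tiretFin v))
    = (fun st v =>
        (st.1 ++ debutB v.toList (dashPositions v.toList 0),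
         st.2.1 ++ milieuB v.toList (dashPositions v.toList 0),
         st.2.2 ++ finB v.toList (dashPositions v.toList 0))) := by
  funext st v
  rw [debut_eq, milieu_eq, fin_eq]

-- ===== VERDICT (by name: the statement is the Claim_ definition above) =====
theorem separtiret_spec : Claim_equal_separtiret := by
  intro liste _
  unfold Spec_separtiret separtiret separtiret_alt
  rw [fold_bodies_eq]
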